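-- pv_equiv track=rewrite | github.com/LLNL/STAT | scripts/STAThelper.py | escaped_label
-- ===== SOURCE A (Python) =====
-- def escaped_label(label):
--     """return a copy of the label with appropriate escape characters added"""
--     if label.find('<') == -1 and label.find('>') == -1:
--         return label
--     ret = ''
--     prev = ' '
--     for character in label:
--         if prev != '\\' and (character == '<' or character == '>'):
--             ret += '\\'
--         ret += character
--         prev = character
--     return ret
-- ===== SOURCE B (Python) =====
-- import re
--
-- def escaped_label(label):
--     """return a copy of the label with appropriate escape characters added"""
--     return re.sub(r'(?<!\\)[<>]', r'\\\g<0>', label)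
-- ===== Notes on version B (the rewrite author's own statement) =====
-- stated objective: idiomatic
-- what changed: Replaced the manual character loop with prev-state tracking and an early-return scan by a single regex substitution whose negative lookbehind expresses the same skip-if-preceded-by-backslash rule.
import Mathlib
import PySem

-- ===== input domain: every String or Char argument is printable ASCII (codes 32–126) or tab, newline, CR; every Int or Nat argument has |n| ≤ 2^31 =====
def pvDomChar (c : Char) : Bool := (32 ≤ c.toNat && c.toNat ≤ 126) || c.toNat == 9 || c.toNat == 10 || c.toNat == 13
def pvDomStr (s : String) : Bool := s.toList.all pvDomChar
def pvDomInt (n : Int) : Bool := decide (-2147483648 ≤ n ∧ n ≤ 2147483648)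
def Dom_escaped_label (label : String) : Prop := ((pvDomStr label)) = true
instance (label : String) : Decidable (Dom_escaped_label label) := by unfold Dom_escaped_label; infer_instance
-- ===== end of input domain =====

-- B replaces A's prev-tracking accumulator loop by one regex substitution (idiomatic, not faster).

-- ===== PORT A =====
-- A's loop body as a named step function (the port folds it over the characters)
def pvStep : List Char × Char → Char → List Char × Char :=
  fun st c => ((if st.2 ≠ '\\' ∧ (c = '<' ∨ c = '>') then st.1 ++ ['\\'] else st.1) ++ [c], c)

def escaped_label (label : String) : String :=
  if PySem.Str.find label "<" = -1 ∧ PySem.Str.find label ">" = -1 then label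
  else
    String.ofList (label.toList.foldl pvStep ([], ' ')).1

-- ===== PORT B =====
-- The per-position replacement: an unescaped '<' or '>' gains a backslash, anything else stays.
def pvF : Char → Char → List Char :=
  fun p c => if (c = '<' ∨ c = '>') ∧ p ≠ '\\' then ['\\', c] else [c]

-- Hand port of re.sub(r'(?<!\\)[<>]', r'\\\g<0>', label): exact because the lookbehind
-- inspects only the single preceding character (modelled as ' ' at position 0, where no
-- preceding character exists and the lookbehind trivially succeeds).
def escaped_label_alt (label : String) : String :=
  String.ofList ((List.zipWith pvF (' ' :: label.toList) label.toList).flatten)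

-- ===== PRECONDITION & SPEC =====
def Spec_escaped_label (label : String) (out : String) : Prop := out = escaped_label_alt label
instance (label : String) (out : String) : Decidable (Spec_escaped_label label out) := by unfold Spec_escaped_label; infer_instance

-- ===== CLAIM (what is proved, stated in full; the proofs are below) =====
def Claim_equal_escaped_label : Prop := ∀ (label : String), Dom_escaped_label label → Spec_escaped_label label (escaped_label label)

-- ===== LEMMAS AND PROOFS =====

theorem pv_loop_eq (l : List Char) : ∀ (acc : List Char) (prev : Char),
    (l.foldl pvStep (acc, prev)).1 = acc ++ (List.zipWith pvF (prev :: l) l).flatten := by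
  induction l with
  | nil => intro acc prev; simp
  | cons c t ih =>
    intro acc prev
    simp only [List.foldl_cons, List.zipWith_cons_cons, List.flatten_cons]
    have : pvStep (acc, prev) c = (acc ++ pvF prev c, c) := by
      simp only [pvStep, pvF]
      by_cases h1 : prev = '\\' <;> by_cases h2 : c = '<' ∨ c = '>' <;>
        simp [h1, h2]
    rw [this, ih]
    simp

theorem pv_noesc (l : List Char) (h1 : ¬ ['<'] <:+: l) (h2 : ¬ ['>'] <:+: l) :
    ∀ prev, (List.zipWith pvF (prev :: l) l).flatten = l := by
  induction l with
  | nil => intro _; simp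
  | cons c t ih =>
    intro prev
    have hc1 : c ≠ '<' := by rintro rfl; exact h1 ⟨[], t, by simp⟩
    have hc2 : c ≠ '>' := by rintro rfl; exact h2 ⟨[], t, by simp⟩
    have ht1 : ¬ ['<'] <:+: t := fun hx => h1 (hx.trans (List.suffix_cons c t).isInfix)
    have ht2 : ¬ ['>'] <:+: t := fun hx => h2 (hx.trans (List.suffix_cons c t).isInfix)
    simp only [List.zipWith_cons_cons, List.flatten_cons, pvF]
    rw [if_neg (by simp [hc1, hc2]), ih ht1 ht2]
    simp

-- ===== VERDICT (by name: the statement is the Claim_ definition above) =====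
theorem escaped_label_spec : Claim_equal_escaped_label := by
  intro label _
  unfold Spec_escaped_label escaped_label escaped_label_alt
  split
  · next h =>
    obtain ⟨h1, h2⟩ := h
    rw [PySem.Str.find_eq_neg_one_iff] at h1 h2
    have : (List.zipWith pvF (' ' :: label.toList) label.toList).flatten = label.toList :=
      pv_noesc label.toList (by simpa using h1) (by simpa using h2) ' '
    rw [this]
    simp
  · rw [pv_loop_eq label.toList [] ' ', List.nil_append]
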